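-- pv_equiv track=rewrite | github.com/KikoBelchi/2D_to_3D_Hausdorff | submesh.py | idx_within_submesh_of_consecutive_3_vertices_horizontally_within_submesh
-- ===== SOURCE A (Python) =====
-- def matrix_coord_from_idx(idx, num_vertices_width = 103):
--     """ Input: the index of a vertex within the reordered vertex list
--     (i.e., not from the vertex list ordered as directly given by Blender)
--
--     Output: matrix_coord is a tuple of the form (x, y),
--     where these are the matrix coordinates of a vertex seen as a vertex of the original mesh (not as a vertex of a submesh).
--     These (x, y) matrix coordinates correspond to vertical downwards and horizontal rightwards, respectively. """
--     matrix_coord_from_idx_0 = int(int(idx) // num_vertices_width)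
--     matrix_coord_from_idx_1 = idx%num_vertices_width
--     return matrix_coord_from_idx_0, matrix_coord_from_idx_1
--
-- def idx_from_matrix_coord(matrix_coord, num_vertices_width = 103):
--     """ Input: matrix_coord is a tuple of the form (x, y), where these are the matrix coordinates of a vertex seen as a vertex of the original mesh (not as a vertex of a submesh).
--     These (x, y) matrix coordinates correspond to vertical downwards and horizontal rightwards, respectively.
--
--     Output: the index of the vertex within the reordered vertex list
--     (i.e., not from the vertex list ordered as directly given by Blender) """
--     return matrix_coord[1] + matrix_coord[0]*num_vertices_width
--
-- def consecutive_3_vertices_horizontally_in_mesh(matrix_coord, num_vertices_width = 103, num_vertices_height = 52):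
--     """ Input: matrix_coord is a tuple of the form (x, y),
--     where these are the matrix coordinates of a vertex of a mesh.
--     These (x, y) matrix coordinates correspond to vertical downwards and horizontal rightwards, respectively.
--
--     Output: list of matrix coordinates (as tuples (x, y)) of the given vertex and the next two vertices moving horizontally right-wards in the mesh.
--     If the vertex is either on the last or second-to-last column, the output is [None, None, None].
--
--     Note: (original mesh vs submesh)
--     The mesh all vertices are considered in for the matrix coordinates and for the notion of neighbour is the mesh with:
--     - number of vertices in horizontal direction: num_vertices_width.
--     - number of vertices in vertical direction: num_vertices_height.
--     """
--     if matrix_coord[1]+2 < num_vertices_width: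
--         return [(matrix_coord[0], matrix_coord[1]+i) for i in range(3)]
--     else:
--         return [None, None, None]
--
-- def idx_within_submesh_of_consecutive_3_vertices_horizontally_within_submesh(v_idx_submesh,
--                                                           submesh_num_vertices_vertical = 2,
--                                                           submesh_num_vertices_horizontal = 3):
--     """ Input:
--     - v_idx_mesh: index within the submesh of a vertex v of the submesh.
--     - submesh_num_vertices_horizontal: number of vertices in the submesh in the horizontal direction.
--     - submesh_num_vertices_vertical: number of vertices in the submesh in the vertical direction.
--
--     This function builds the list of the given vertex and the next two vertices moving horizontally right-wards in the mesh.
--     Output: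
--     - list of indices within the submesh of these 3 vertices. """
--     # Convert index of v within the submesh to matrix coordinates within the submesh
--     v_matrix_coord_submesh = matrix_coord_from_idx(v_idx_submesh, num_vertices_width = submesh_num_vertices_horizontal)
--
--     # Find list of matrix coordinates within submesh of 3 consecutive vertices
--     consecutive3_coord_submesh = consecutive_3_vertices_horizontally_in_mesh(
--         v_matrix_coord_submesh, num_vertices_width = submesh_num_vertices_horizontal,
--         num_vertices_height = submesh_num_vertices_vertical)
--
--     # Convert matrix coordinates of neighbours within submesh to indices within submesh
--     if consecutive3_coord_submesh[0] is not None: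
--         consecutive3_idx_submesh = [idx_from_matrix_coord(matrix_coord, num_vertices_width = submesh_num_vertices_horizontal)
--                               for matrix_coord in consecutive3_coord_submesh]
--     else:
--         consecutive3_idx_submesh = [None, None, None]
--
--     return consecutive3_idx_submesh
-- ===== SOURCE B (Python) =====
-- def idx_within_submesh_of_consecutive_3_vertices_horizontally_within_submesh(v_idx_submesh,
--                                                           submesh_num_vertices_vertical = 2,
--                                                           submesh_num_vertices_horizontal = 3):
--     # The three submesh indices are always just the start index and its two
--     # successors, gated by whether the column remainder leaves room for 2 more.
--     r = v_idx_submesh % submesh_num_vertices_horizontal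
--     if r + 2 < submesh_num_vertices_horizontal:
--         return [v_idx_submesh, v_idx_submesh + 1, v_idx_submesh + 2]
--     return [None, None, None]
-- ===== Notes on version B (the rewrite author's own statement) =====
-- stated objective: simpler
-- what changed: B drops the coord-from-index / index-from-coord round trip and the range(3) comprehension entirely: one modulo decides the branch and the result is the start index and its two successors.
import Mathlib
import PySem

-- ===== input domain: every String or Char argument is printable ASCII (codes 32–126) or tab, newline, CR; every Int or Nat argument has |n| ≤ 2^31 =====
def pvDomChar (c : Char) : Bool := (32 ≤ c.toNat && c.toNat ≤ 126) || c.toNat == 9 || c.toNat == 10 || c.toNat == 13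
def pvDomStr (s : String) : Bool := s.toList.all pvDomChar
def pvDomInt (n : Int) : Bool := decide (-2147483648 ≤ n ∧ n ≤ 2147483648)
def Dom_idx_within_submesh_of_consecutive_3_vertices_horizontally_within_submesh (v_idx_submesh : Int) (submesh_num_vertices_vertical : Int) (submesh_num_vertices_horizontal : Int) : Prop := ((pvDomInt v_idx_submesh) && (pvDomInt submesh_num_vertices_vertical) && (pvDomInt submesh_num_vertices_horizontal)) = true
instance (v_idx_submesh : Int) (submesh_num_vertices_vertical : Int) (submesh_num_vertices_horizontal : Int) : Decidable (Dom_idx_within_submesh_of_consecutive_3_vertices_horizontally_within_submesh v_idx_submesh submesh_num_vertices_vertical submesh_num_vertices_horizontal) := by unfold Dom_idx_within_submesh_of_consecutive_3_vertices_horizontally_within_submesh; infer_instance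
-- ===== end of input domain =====

-- B replaces A's coordinate round-trip (index → matrix coords → 3 coords → 3 indices)
-- by one modulo test and the three consecutive indices directly (objective: simpler).

-- ===== PORT A =====
-- helper: matrix_coord_from_idx(idx, num_vertices_width)
def pvA_matrix_coord_from_idx (idx : Int) (num_vertices_width : Int) : Int × Int :=
  (PySem.Int.floordiv idx num_vertices_width, PySem.Int.mod idx num_vertices_width)

-- helper: idx_from_matrix_coord(matrix_coord, num_vertices_width)
def pvA_idx_from_matrix_coord (matrix_coord : Int × Int) (num_vertices_width : Int) : Int :=
  matrix_coord.2 + matrix_coord.1 * num_vertices_width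

-- helper: consecutive_3_vertices_horizontally_in_mesh (num_vertices_height unused, kept)
def pvA_consecutive_3 (matrix_coord : Int × Int) (num_vertices_width : Int)
    (_num_vertices_height : Int) : List (Option (Int × Int)) :=
  if matrix_coord.2 + 2 < num_vertices_width then
    (PySem.List.pyRange 0 3 1).map (fun i => some (matrix_coord.1, matrix_coord.2 + i))
  else [none, none, none]

def idx_within_submesh_of_consecutive_3_vertices_horizontally_within_submesh (v_idx_submesh : Int) (submesh_num_vertices_vertical : Int) (submesh_num_vertices_horizontal : Int) : List (Option Int) :=
  let v_matrix_coord_submesh := pvA_matrix_coord_from_idx v_idx_submesh submesh_num_vertices_horizontal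
  let consecutive3_coord_submesh := pvA_consecutive_3 v_matrix_coord_submesh submesh_num_vertices_horizontal submesh_num_vertices_vertical
  if (consecutive3_coord_submesh.headD none).isSome then
    consecutive3_coord_submesh.map (fun mc =>
      match mc with
      | some c => some (pvA_idx_from_matrix_coord c submesh_num_vertices_horizontal)
      | none => none)
  else [none, none, none]

-- ===== PORT B =====
def idx_within_submesh_of_consecutive_3_vertices_horizontally_within_submesh_alt (v_idx_submesh : Int) (submesh_num_vertices_vertical : Int) (submesh_num_vertices_horizontal : Int) : List (Option Int) :=
  let r := PySem.Int.mod v_idx_submesh submesh_num_vertices_horizontal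
  if r + 2 < submesh_num_vertices_horizontal then
    [some v_idx_submesh, some (v_idx_submesh + 1), some (v_idx_submesh + 2)]
  else [none, none, none]

-- ===== PRECONDITION & SPEC =====
-- Pre_ excludes only submesh_num_vertices_horizontal = 0, where Python A raises ZeroDivisionError.
def Pre_idx_within_submesh_of_consecutive_3_vertices_horizontally_within_submesh (v_idx_submesh : Int) (submesh_num_vertices_vertical : Int) (submesh_num_vertices_horizontal : Int) : Prop := submesh_num_vertices_horizontal ≠ 0
instance (v_idx_submesh : Int) (submesh_num_vertices_vertical : Int) (submesh_num_vertices_horizontal : Int) : Decidable (Pre_idx_within_submesh_of_consecutive_3_vertices_horizontally_within_submesh v_idx_submesh submesh_num_vertices_vertical submesh_num_vertices_horizontal) := by unfold Pre_idx_within_submesh_of_consecutive_3_vertices_horizontally_within_submesh; infer_instance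
def pvWitness_idx_within_submesh_of_consecutive_3_vertices_horizontally_within_submesh : Int × Int × Int := (0, 2, 3)

def Spec_idx_within_submesh_of_consecutive_3_vertices_horizontally_within_submesh (v_idx_submesh : Int) (submesh_num_vertices_vertical : Int) (submesh_num_vertices_horizontal : Int) (out : List (Option Int)) : Prop := out = idx_within_submesh_of_consecutive_3_vertices_horizontally_within_submesh_alt v_idx_submesh submesh_num_vertices_vertical submesh_num_vertices_horizontal
instance (v_idx_submesh : Int) (submesh_num_vertices_vertical : Int) (submesh_num_vertices_horizontal : Int) (out : List (Option Int)) : Decidable (Spec_idx_within_submesh_of_consecutive_3_vertices_horizontally_within_submesh v_idx_submesh submesh_num_vertices_vertical submesh_num_vertices_horizontal out) := by unfold Spec_idx_within_submesh_of_consecutive_3_vertices_horizontally_within_submesh; infer_instance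

-- ===== CLAIM (what is proved, stated in full; the proofs are below) =====
def Claim_equal_idx_within_submesh_of_consecutive_3_vertices_horizontally_within_submesh : Prop := ∀ (v_idx_submesh : Int) (submesh_num_vertices_vertical : Int) (submesh_num_vertices_horizontal : Int), Dom_idx_within_submesh_of_consecutive_3_vertices_horizontally_within_submesh v_idx_submesh submesh_num_vertices_vertical submesh_num_vertices_horizontal → Pre_idx_within_submesh_of_consecutive_3_vertices_horizontally_within_submesh v_idx_submesh submesh_num_vertices_vertical submesh_num_vertices_horizontal → Spec_idx_within_submesh_of_consecutive_3_vertices_horizontally_within_submesh v_idx_submesh submesh_num_vertices_vertical submesh_num_vertices_horizontal (idx_within_submesh_of_consecutive_3_vertices_horizontally_within_submesh v_idx_submesh submesh_num_vertices_vertical submesh_num_vertices_horizontal)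

-- ===== LEMMAS AND PROOFS =====
theorem pvRange03 : PySem.List.pyRange 0 3 1 = [0, 1, 2] := by decide

-- ===== VERDICT (by name: the statement is the Claim_ definition above) =====
theorem idx_within_submesh_of_consecutive_3_vertices_horizontally_within_submesh_spec : Claim_equal_idx_within_submesh_of_consecutive_3_vertices_horizontally_within_submesh := by
  intro v vv h _ _
  unfold Spec_idx_within_submesh_of_consecutive_3_vertices_horizontally_within_submesh
  unfold idx_within_submesh_of_consecutive_3_vertices_horizontally_within_submesh
    idx_within_submesh_of_consecutive_3_vertices_horizontally_within_submesh_alt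
    pvA_consecutive_3 pvA_matrix_coord_from_idx pvA_idx_from_matrix_coord
  have hid := PySem.Int.floordiv_mul_add_mod v h
  simp only [pvRange03]
  by_cases hc : PySem.Int.mod v h + 2 < h <;>
    simp [hc, List.map] <;> omega
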